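-- pv_equiv track=rewrite | github.com/nathnaelteshome/competative-progamming | code_forces/leetcode/1950.Maximum of Minimum Values in All Subarrays.py | findMaximums
-- ===== SOURCE A (Python) =====
-- from typing import List
--
-- def findMaximums(nums: List[int]) -> List[int]:
--     n = len(nums)
--     ans = [0] * n
--     # prevMin[i] := the index k s.t.
--     # nums[k] is the previous minimum in nums[0..n)
--     prevMin = [-1] * n
--     # nextMin[i] := the index k s.t.
--     # nums[k] is the next minimum innums[i + 1..n)
--     nextMin = [n] * n
--     stack = []
--
--     for i, num in enumerate(nums):
--         while stack and nums[stack[-1]] > nums[i]: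
--             index = stack.pop()
--             nextMin[index] = i
--         if stack:
--             prevMin[i] = stack[-1]
--         stack.append(i)
--
--     # For each nums[i], let l = nextMin[i] + 1 and r = nextMin[i] - 1.
--     # nums[i] is the minimun in nums[l..r].
--     # So, the ans[r - l + 1] will be at least nums[i].
--     for num, l, r in zip(nums, prevMin, nextMin):
--         sz = r - l - 1
--         ans[sz - 1] = max(ans[sz - 1], num)
--
--     # ans[i] should always >= ans[i + 1..n).
--     for i in range(n - 2, -1, -1):
--         ans[i] = max(ans[i], ans[i + 1])
--
--     return ans
-- ===== SOURCE B (Python) =====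
-- from typing import List
--
-- def findMaximums(nums: List[int]) -> List[int]:
--     # Brute force: for each start i, extend the window keeping a running minimum,
--     # and record it as a candidate for the window's size.
--     n = len(nums)
--     ans = [0] * n
--     for i in range(n):
--         m = nums[i]
--         for j in range(i, n):
--             m = min(m, nums[j])
--             ans[j - i] = max(ans[j - i], m)
--     return ans
-- ===== Notes on version B (the rewrite author's own statement) =====
-- stated objective: alternative
-- what changed: A's monotonic-stack prev/next-smaller arrays plus per-span fill and suffix-max pass are replaced by a direct brute force: for each start index extend the window keeping a running minimum and record it as a candidate for that window size.
import Mathlib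
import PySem

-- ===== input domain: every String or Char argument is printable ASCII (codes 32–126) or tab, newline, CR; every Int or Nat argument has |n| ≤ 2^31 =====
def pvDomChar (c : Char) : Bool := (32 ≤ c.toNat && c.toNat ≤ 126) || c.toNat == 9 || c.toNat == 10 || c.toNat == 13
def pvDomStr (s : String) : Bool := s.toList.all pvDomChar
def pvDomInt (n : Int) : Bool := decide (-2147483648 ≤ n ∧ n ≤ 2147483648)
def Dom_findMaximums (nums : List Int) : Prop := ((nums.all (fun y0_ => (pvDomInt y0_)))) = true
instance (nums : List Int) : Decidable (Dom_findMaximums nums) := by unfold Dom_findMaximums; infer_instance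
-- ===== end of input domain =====

-- B replaces A's monotonic-stack prev/next-smaller + suffix-max pipeline by a direct
-- brute force over all windows with a running minimum (objective: alternative, not faster).

-- ===== PORT A =====
-- The Python stack (append/pop at the tail) is represented head-as-top; its elements are the
-- same indices in the same stack order.  Every nums[..] read and every list assignment in A
-- happens at an in-range non-negative index, so getD/set port them exactly.
def pvPopLoop (nums : List Int) (i : Nat) : List Nat → List Int → List Nat × List Int
  | [], nextMin => ([], nextMin)
  | t :: st, nextMin =>
    if nums.getD t 0 > nums.getD i 0 then
      pvPopLoop nums i st (nextMin.set t (i : Int))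
    else (t :: st, nextMin)

def pvStackStep (nums : List Int) (s : List Int × List Int × List Nat) (i : Nat) :
    List Int × List Int × List Nat :=
  let (stack, nextMin) := pvPopLoop nums i s.2.2 s.2.1
  let prevMin := match stack with
    | [] => s.1
    | t :: _ => s.1.set i (t : Int)
  (prevMin, nextMin, i :: stack)

def findMaximums (nums : List Int) : List Int :=
  let n := nums.length
  let res := (List.range n).foldl (pvStackStep nums)
    (List.replicate n (-1), List.replicate n (n : Int), [])
  let ans1 := (nums.zip (res.1.zip res.2.1)).foldl
    (fun ans x =>
      let sz := x.2.2 - x.2.1 - 1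
      ans.set (sz - 1).toNat (max (ans.getD (sz - 1).toNat 0) x.1))
    (List.replicate n 0)
  (PySem.List.pyRange ((n : Int) - 2) (-1) (-1)).foldl
    (fun ans i => ans.set i.toNat (max (ans.getD i.toNat 0) (ans.getD (i.toNat + 1) 0))) ans1

-- ===== PORT B =====
def findMaximums_alt (nums : List Int) : List Int :=
  let n := nums.length
  (List.range n).foldl (fun ans i =>
    ((List.range' i (n - i)).foldl (fun (st : Int × List Int) j =>
        let m := min st.1 (nums.getD j 0)
        (m, st.2.set (j - i) (max (st.2.getD (j - i) 0) m)))
      (nums.getD i 0, ans)).2) (List.replicate n 0)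

-- ===== PRECONDITION & SPEC =====
def Spec_findMaximums (nums : List Int) (out : List Int) : Prop := out = findMaximums_alt nums
instance (nums : List Int) (out : List Int) : Decidable (Spec_findMaximums nums out) := by unfold Spec_findMaximums; infer_instance

-- ===== CLAIM (what is proved, stated in full; the proofs are below) =====
def Claim_equal_findMaximums : Prop := ∀ (nums : List Int), Dom_findMaximums nums → Spec_findMaximums nums (findMaximums nums)

-- ===== LEMMAS AND PROOFS =====
-- Both ports are proved equal to the same closed description: position k holds
-- max(0, max over all windows of size k+1 of the window minimum), written with
-- pvMn (window minimum) and pvSpecv below.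


def pvAv (nums : List Int) (i : Nat) : Int := nums.getD i 0

-- greatest j < i with nums[j] ≤ x, as an Int; -1 if none
def pvPrev (nums : List Int) (x : Int) : Nat → Int
  | 0 => -1
  | j+1 => if pvAv nums j ≤ x then (j : Int) else pvPrev nums x j
def pvPm (nums : List Int) (i : Nat) : Int := pvPrev nums (pvAv nums i) i

-- first index t in [j, j+cnt) with nums[t] < x
def pvFindUp (nums : List Int) (x : Int) : Nat → Nat → Option Nat
  | _, 0 => none
  | j, cnt+1 => if pvAv nums j < x then some j else pvFindUp nums x (j+1) cnt
def pvNmU (nums : List Int) (m i : Nat) : Int :=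
  match pvFindUp nums (pvAv nums i) (i+1) (m - (i+1)) with
  | some j => (j : Int)
  | none => (nums.length : Int)
def pvNm (nums : List Int) (i : Nat) : Int := pvNmU nums nums.length i

def pvGood (nums : List Int) (m j : Nat) : Bool :=
  (List.range' (j+1) (m - (j+1))).all (fun k => decide (pvAv nums j ≤ pvAv nums k))
def pvStk (nums : List Int) (m : Nat) : List Nat :=
  ((List.range m).filter (pvGood nums m)).reverse

-- ## pvPrev facts
lemma pvPrev_bounds (nums : List Int) (x : Int) : ∀ i, -1 ≤ pvPrev nums x i ∧ pvPrev nums x i < i := by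
  intro i
  induction i with
  | zero => simp [pvPrev]
  | succ j ih =>
    simp only [pvPrev]
    split_ifs with h
    · constructor <;> omega
    · exact ⟨ih.1, by exact_mod_cast lt_trans ih.2 (by exact_mod_cast Nat.lt_succ_self j)⟩

lemma pvPrev_le_of (nums : List Int) (x : Int) : ∀ i j, j < i → pvAv nums j ≤ x →
    (j : Int) ≤ pvPrev nums x i := by
  intro i
  induction i with
  | zero => omega
  | succ i ih =>
    intro j hj hle
    simp only [pvPrev]
    split_ifs with h
    · exact_mod_cast Nat.le_of_lt_succ hj
    · rcases Nat.lt_or_ge j i with h2 | h2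
      · exact ih j h2 hle
      · have : j = i := by omega
        subst this; exact absurd hle h

lemma pvPrev_gt (nums : List Int) (x : Int) : ∀ i t, t < i → pvPrev nums x i < (t : Int) →
    x < pvAv nums t := by
  intro i
  induction i with
  | zero => omega
  | succ i ih =>
    intro t ht hgt
    simp only [pvPrev] at hgt
    split_ifs at hgt with h
    · omega
    · rcases Nat.lt_or_ge t i with h2 | h2
      · exact ih t h2 hgt
      · have : t = i := by omega
        subst this; omega

lemma pvPrev_val (nums : List Int) (x : Int) : ∀ i, 0 ≤ pvPrev nums x i →
    pvAv nums ((pvPrev nums x i).toNat) ≤ x ∧ (pvPrev nums x i).toNat < i := by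
  intro i
  induction i with
  | zero => simp [pvPrev]
  | succ i ih =>
    intro h0
    simp only [pvPrev] at h0 ⊢
    split_ifs at h0 ⊢ with h
    · refine ⟨?_, ?_⟩ <;> simp [h]
    · obtain ⟨hv, hlt⟩ := ih h0
      exact ⟨hv, by omega⟩

-- ## pvFindUp facts
lemma pvFindUp_none_iff (nums : List Int) (x : Int) : ∀ cnt j,
    pvFindUp nums x j cnt = none ↔ ∀ t, j ≤ t → t < j + cnt → ¬(pvAv nums t < x) := by
  intro cnt
  induction cnt with
  | zero => intro j; simp [pvFindUp]; omega
  | succ cnt ih =>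
    intro j
    simp only [pvFindUp]
    split_ifs with h
    · simp only [false_iff]
      intro hall
      exact hall j (le_refl j) (by omega) h
    · rw [ih (j+1)]
      constructor
      · intro hall t ht1 ht2
        rcases Nat.lt_or_ge t (j+1) with h2 | h2
        · have : t = j := by omega
          subst this; exact h
        · exact hall t h2 (by omega)
      · intro hall t ht1 ht2
        exact hall t (by omega) (by omega)

lemma pvFindUp_some (nums : List Int) (x : Int) : ∀ cnt j t,
    pvFindUp nums x j cnt = some t →
    j ≤ t ∧ t < j + cnt ∧ pvAv nums t < x ∧ ∀ s, j ≤ s → s < t → ¬(pvAv nums s < x) := by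
  intro cnt
  induction cnt with
  | zero => intro j t h; simp [pvFindUp] at h
  | succ cnt ih =>
    intro j t h
    simp only [pvFindUp] at h
    split_ifs at h with hj
    · cases h
      exact ⟨le_refl _, by omega, hj, by omega⟩
    · obtain ⟨h1, h2, h3, h4⟩ := ih (j+1) t h
      refine ⟨by omega, by omega, h3, ?_⟩
      intro s hs1 hs2
      rcases Nat.lt_or_ge s (j+1) with hc | hc
      · have : s = j := by omega
        subst this; exact hj
      · exact h4 s hc hs2

lemma pvFindUp_append (nums : List Int) (x : Int) : ∀ cnt j,
    pvFindUp nums x j (cnt+1) = match pvFindUp nums x j cnt with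
      | some t => some t
      | none => if pvAv nums (j+cnt) < x then some (j+cnt) else none := by
  intro cnt
  induction cnt with
  | zero => intro j; simp [pvFindUp]
  | succ cnt ih =>
    intro j
    by_cases h : pvAv nums j < x
    · have l1 : pvFindUp nums x j (cnt+1+1) = some j := by
        simp only [pvFindUp, if_pos h]
      have l2 : pvFindUp nums x j (cnt+1) = some j := by
        simp only [pvFindUp, if_pos h]
      rw [l1, l2]
    · have l1 : pvFindUp nums x j (cnt+1+1) = pvFindUp nums x (j+1) (cnt+1) := by
        simp only [pvFindUp, if_neg h]
      have l2 : pvFindUp nums x j (cnt+1) = pvFindUp nums x (j+1) cnt := by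
        simp only [pvFindUp, if_neg h]
      rw [l1, l2, ih (j+1), show j + 1 + cnt = j + (cnt + 1) by omega]

-- ## pvGood / pvStk facts
lemma pvGood_iff (nums : List Int) (m j : Nat) :
    pvGood nums m j = true ↔ ∀ k, j < k → k < m → pvAv nums j ≤ pvAv nums k := by
  unfold pvGood
  rw [List.all_eq_true]
  constructor
  · intro h k hk1 hk2
    have : k ∈ List.range' (j+1) (m - (j+1)) := by
      rw [List.mem_range'_1]; omega
    simpa using h k this
  · intro h k hk
    rw [List.mem_range'_1] at hk
    simpa using h k (by omega) (by omega)

lemma pvGood_succ (nums : List Int) (c j : Nat) (hj : j < c) :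
    pvGood nums (c+1) j = (pvGood nums c j && decide (pvAv nums j ≤ pvAv nums c)) := by
  unfold pvGood
  have h1 : c + 1 - (j+1) = (c - (j+1)) + 1 := by omega
  have h2 : j + 1 + (c - (j+1)) = c := by omega
  rw [h1, List.range'_1_concat, List.all_append, h2]
  simp

lemma pv_mem_stk (nums : List Int) (m j : Nat) :
    j ∈ pvStk nums m ↔ j < m ∧ pvGood nums m j = true := by
  unfold pvStk
  simp [List.mem_filter, List.mem_range]

lemma pv_stk_sorted (nums : List Int) (m : Nat) : (pvStk nums m).Pairwise (· > ·) := by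
  unfold pvStk
  rw [List.pairwise_reverse]
  exact List.Pairwise.filter _ (List.pairwise_lt_range)

-- dropWhile = filter when p is antitone along the list
lemma pv_dropWhile_eq_filter {p : Nat → Bool} : ∀ (l : List Nat),
    l.Pairwise (fun x y => p x = false → p y = false) →
    l.dropWhile p = l.filter (fun x => !p x) := by
  intro l
  induction l with
  | nil => simp
  | cons a t ih =>
    intro hp
    rw [List.pairwise_cons] at hp
    by_cases h : p a
    · rw [List.dropWhile_cons_of_pos h, List.filter_cons_of_neg (by simp [h]), ih hp.2]
    · rw [List.dropWhile_cons_of_neg (by simp [h]),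
        List.filter_cons_of_pos (by simp [h])]
      have : t.filter (fun x => !p x) = t := by
        apply List.filter_eq_self.2
        intro x hx
        simp [hp.1 x hx (by simpa using h)]
      rw [this]

lemma pv_takeWhile_eq_filter {p : Nat → Bool} : ∀ (l : List Nat),
    l.Pairwise (fun x y => p x = false → p y = false) →
    l.takeWhile p = l.filter p := by
  intro l
  induction l with
  | nil => simp
  | cons a t ih =>
    intro hp
    rw [List.pairwise_cons] at hp
    by_cases h : p a
    · rw [List.takeWhile_cons_of_pos h, List.filter_cons_of_pos h, ih hp.2]
    · rw [List.takeWhile_cons_of_neg (by simpa using h), List.filter_cons_of_neg (by simpa using h)]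
      symm
      apply List.filter_eq_nil_iff.2
      intro x hx
      simp [hp.1 x hx (by simpa using h)]

lemma pv_getD_set (l : List Int) (i j : Nat) (x : Int) :
    (l.set i x).getD j 0 = if i = j ∧ j < l.length then x else l.getD j 0 := by
  simp only [List.getD_eq_getElem?_getD, List.getElem?_set]
  rcases Nat.lt_or_ge j l.length with h | h
  · split_ifs <;> simp_all
  · have : l[j]? = none := by simpa using h
    split_ifs <;> simp_all

-- ## pop loop behaviour
lemma pvPopLoop_eq (nums : List Int) (i : Nat) : ∀ (st : List Nat) (nM : List Int),
    pvPopLoop nums i st nM =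
      (st.dropWhile (fun t => decide (pvAv nums i < pvAv nums t)),
       (st.takeWhile (fun t => decide (pvAv nums i < pvAv nums t))).foldl
         (fun m t => m.set t (i : Int)) nM) := by
  intro st
  induction st with
  | nil => intro nM; simp [pvPopLoop]
  | cons t rest ih =>
    intro nM
    by_cases h : pvAv nums i < pvAv nums t
    · rw [pvPopLoop, if_pos (by simpa [pvAv] using h), ih,
        List.dropWhile_cons_of_pos (by simpa using h),
        List.takeWhile_cons_of_pos (by simpa using h), List.foldl_cons]
    · rw [pvPopLoop, if_neg (by simpa [pvAv] using h),
        List.dropWhile_cons_of_neg (by simpa using h),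
        List.takeWhile_cons_of_neg (by simpa using h), List.foldl_nil]

lemma pv_foldl_set_length (c : Int) : ∀ (L : List Nat) (nM : List Int),
    (L.foldl (fun m t => m.set t c) nM).length = nM.length := by
  intro L
  induction L with
  | nil => intro nM; rfl
  | cons a l ih => intro nM; rw [List.foldl_cons, ih]; simp

lemma pv_foldl_set_getD (c : Int) : ∀ (L : List Nat) (nM : List Int) (t : Nat),
    (L.foldl (fun m j => m.set j c) nM).getD t 0 =
      if t ∈ L ∧ t < nM.length then c else nM.getD t 0 := by
  intro L
  induction L with
  | nil => intro nM t; simp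
  | cons a l ih =>
    intro nM t
    rw [List.foldl_cons, ih, List.length_set, pv_getD_set]
    by_cases h1 : t ∈ l ∧ t < nM.length
    · rw [if_pos h1, if_pos ⟨List.mem_cons_of_mem a h1.1, h1.2⟩]
    · rw [if_neg h1]
      by_cases h2 : a = t ∧ t < nM.length
      · rw [if_pos h2, if_pos ⟨by rw [h2.1.symm]; exact List.mem_cons_self, h2.2⟩]
      · rw [if_neg h2, if_neg (by
          intro hc
          rcases List.mem_cons.1 hc.1 with h3 | h3
          · exact h2 ⟨h3.symm, hc.2⟩
          · exact h1 ⟨h3, hc.2⟩)]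

lemma pv_stk_antitone (nums : List Int) (c : Nat) :
    (pvStk nums c).Pairwise (fun x y =>
      (decide (pvAv nums c < pvAv nums x) = false) →
      (decide (pvAv nums c < pvAv nums y) = false)) := by
  have hs := List.Pairwise.and_mem.mp (pv_stk_sorted nums c)
  refine hs.imp ?_
  rintro x y ⟨hx, hy, hgt⟩
  simp only [decide_eq_false_iff_not, not_lt]
  intro hxc
  obtain ⟨hyc, hgood⟩ := (pv_mem_stk nums c y).1 hy
  obtain ⟨hxcc, -⟩ := (pv_mem_stk nums c x).1 hx
  exact le_trans ((pvGood_iff nums c y).1 hgood x hgt hxcc) hxc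

lemma pvStackStep_def (nums : List Int) (s : List Int × List Int × List Nat) (i : Nat) :
    pvStackStep nums s i =
      ((match (pvPopLoop nums i s.2.2 s.2.1).1 with
        | [] => s.1
        | t :: _ => s.1.set i (t : Int)),
       (pvPopLoop nums i s.2.2 s.2.1).2,
       i :: (pvPopLoop nums i s.2.2 s.2.1).1) := by
  unfold pvStackStep
  rcases hp : pvPopLoop nums i s.2.2 s.2.1 with ⟨st, nM⟩
  rfl

lemma pv_stk_succ (nums : List Int) (c : Nat) :
    pvStk nums (c+1) = c ::
      (pvStk nums c).filter (fun t => !decide (pvAv nums c < pvAv nums t)) := by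
  unfold pvStk
  have hgc : pvGood nums (c+1) c = true := by unfold pvGood; simp
  have hsing : [c].filter (pvGood nums (c+1)) = [c] := by simp [hgc]
  have hcong : (List.range c).filter (pvGood nums (c+1)) =
      (List.range c).filter
        (fun j => pvGood nums c j && !decide (pvAv nums c < pvAv nums j)) := by
    apply List.filter_congr
    intro j hj
    rw [pvGood_succ nums c j (List.mem_range.1 hj)]
    congr 1
    rw [← decide_not]
    exact decide_eq_decide.mpr not_lt.symm
  rw [List.range_succ, List.filter_append, hsing, List.reverse_append, hcong,
    List.filter_reverse, List.filter_filter]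
  simp only [List.reverse_cons, List.reverse_nil, List.nil_append, List.cons_append]
  congr 1
  exact congrArg List.reverse (List.filter_congr (fun a _ => Bool.and_comm _ _))

lemma pv_pm_mem (nums : List Int) (c : Nat) (h0 : 0 ≤ pvPm nums c) :
    (pvPm nums c).toNat ∈ pvStk nums c ∧
    pvAv nums ((pvPm nums c).toNat) ≤ pvAv nums c := by
  obtain ⟨hval, hlt⟩ := pvPrev_val nums (pvAv nums c) c h0
  refine ⟨(pv_mem_stk nums c _).2 ⟨hlt, ?_⟩, hval⟩
  rw [pvGood_iff]
  intro k hk1 hk2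
  have : pvPm nums c < (k : Int) := by omega
  exact le_trans hval (le_of_lt (pvPrev_gt nums (pvAv nums c) c k hk2 this))

lemma pvNmU_ge (nums : List Int) (c t : Nat) (h : c ≤ t + 1) :
    pvNmU nums c t = (nums.length : Int) := by
  unfold pvNmU
  have : c - (t+1) = 0 := by omega
  rw [this]
  rfl

lemma pvNmU_succ (nums : List Int) (t c : Nat) (ht : t < c) :
    pvNmU nums (c+1) t = match pvFindUp nums (pvAv nums t) (t+1) (c-(t+1)) with
      | some j => (j : Int)
      | none => if pvAv nums c < pvAv nums t then (c : Int) else (nums.length : Int) := by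
  unfold pvNmU
  have h1 : c + 1 - (t+1) = (c - (t+1)) + 1 := by omega
  rw [h1, pvFindUp_append]
  have h2 : t + 1 + (c - (t+1)) = c := by omega
  rw [h2]
  cases pvFindUp nums (pvAv nums t) (t+1) (c-(t+1)) with
  | some j => rfl
  | none => split_ifs <;> rfl

lemma pv_good_iff_none (nums : List Int) (c t : Nat) (ht : t < c) :
    pvGood nums c t = true ↔ pvFindUp nums (pvAv nums t) (t+1) (c-(t+1)) = none := by
  rw [pvGood_iff, pvFindUp_none_iff]
  constructor
  · intro h k h1 h2
    exact not_lt.2 (h k (by omega) (by omega))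
  · intro h k h1 h2
    exact not_lt.1 (h k (by omega) (by omega))

def pvInv (nums : List Int) (c : Nat) (s : List Int × List Int × List Nat) : Prop :=
  s.1.length = nums.length ∧ s.2.1.length = nums.length ∧ s.2.2 = pvStk nums c ∧
  (∀ t, t < nums.length → s.1.getD t 0 = if t < c then pvPm nums t else -1) ∧
  (∀ t, t < nums.length → s.2.1.getD t 0 = pvNmU nums c t)

lemma pvInv_init (nums : List Int) :
    pvInv nums 0 (List.replicate nums.length (-1),
      List.replicate nums.length (nums.length : Int), []) := by
  refine ⟨by simp, by simp, by simp [pvStk], ?_, ?_⟩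
  · intro t ht
    rw [List.getD_eq_getElem?_getD, List.getElem?_replicate, if_pos ht]
    rfl
  · intro t ht
    rw [List.getD_eq_getElem?_getD, List.getElem?_replicate, if_pos ht, pvNmU_ge nums 0 t (by omega)]
    rfl

lemma pvInv_step (nums : List Int) (c : Nat) (hc : c < nums.length)
    (s : List Int × List Int × List Nat) (h : pvInv nums c s) :
    pvInv nums (c+1) (pvStackStep nums s c) := by
  obtain ⟨h1, h2, h3, h4, h5⟩ := h
  have hanti := pv_stk_antitone nums c
  rw [pvStackStep_def, pvPopLoop_eq, h3, pv_dropWhile_eq_filter _ hanti,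
    pv_takeWhile_eq_filter _ hanti]
  have hmemM : ∀ t, t ∈ (pvStk nums c).filter
      (fun x => !decide (pvAv nums c < pvAv nums x)) →
      t < c ∧ pvGood nums c t = true ∧ pvAv nums t ≤ pvAv nums c := by
    intro t ht
    obtain ⟨hs, hb⟩ := List.mem_filter.1 ht
    obtain ⟨htc, htg⟩ := (pv_mem_stk nums c t).1 hs
    refine ⟨htc, htg, ?_⟩
    simpa [not_lt] using hb
  have hpmM : 0 ≤ pvPm nums c → (pvPm nums c).toNat ∈ (pvStk nums c).filter
      (fun x => !decide (pvAv nums c < pvAv nums x)) := by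
    intro h0
    obtain ⟨hmem, hle⟩ := pv_pm_mem nums c h0
    exact List.mem_filter.2 ⟨hmem, by simpa [not_lt] using hle⟩
  refine ⟨?_, ?_, ?_, ?_, ?_⟩
  · show (match (pvStk nums c).filter (fun x => !decide (pvAv nums c < pvAv nums x)) with
      | [] => s.1
      | t :: _ => s.1.set c (t : Int)).length = nums.length
    cases (pvStk nums c).filter (fun x => !decide (pvAv nums c < pvAv nums x)) with
    | nil => exact h1
    | cons t0 M' => simpa using h1
  · show ((((pvStk nums c).filter (fun x => decide (pvAv nums c < pvAv nums x))).foldl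
      (fun m t => m.set t (c : Int)) s.2.1)).length = nums.length
    rw [pv_foldl_set_length]
    exact h2
  · show (c :: (pvStk nums c).filter (fun x => !decide (pvAv nums c < pvAv nums x)))
      = pvStk nums (c+1)
    rw [pv_stk_succ]
  · intro t ht
    show (match (pvStk nums c).filter (fun x => !decide (pvAv nums c < pvAv nums x)) with
      | [] => s.1
      | t :: _ => s.1.set c (t : Int)).getD t 0 = _
    cases hM : (pvStk nums c).filter (fun x => !decide (pvAv nums c < pvAv nums x)) with
    | nil =>
      rw [h4 t ht]
      by_cases htc : t < c
      · rw [if_pos htc, if_pos (by omega)]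
      · rw [if_neg htc]
        by_cases htc2 : t < c + 1
        · rw [if_pos htc2]
          have htec : t = c := by omega
          subst htec
          by_contra hne
          have h0 : 0 ≤ pvPm nums t := by
            have hb : -1 ≤ pvPm nums t := (pvPrev_bounds nums (pvAv nums t) t).1
            omega
          have := hpmM h0
          rw [hM] at this
          simp at this
        · rw [if_neg htc2]
    | cons t0 M' =>
      have ht0 : t0 ∈ (pvStk nums c).filter (fun x => !decide (pvAv nums c < pvAv nums x)) := by
        rw [hM]; exact List.mem_cons_self
      obtain ⟨ht0c, ht0g, ht0le⟩ := hmemM t0 ht0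
      have hpm : (t0 : Int) = pvPm nums c := by
        have hle1 : (t0 : Int) ≤ pvPm nums c := pvPrev_le_of nums (pvAv nums c) c t0 ht0c ht0le
        have h0 : 0 ≤ pvPm nums c := le_trans (by positivity) hle1
        have hjmem := hpmM h0
        rw [hM] at hjmem
        have hsorted : ((pvStk nums c).filter
            (fun x => !decide (pvAv nums c < pvAv nums x))).Pairwise (· > ·) :=
          List.Pairwise.filter _ (pv_stk_sorted nums c)
        rw [hM, List.pairwise_cons] at hsorted
        have hj_le : (pvPm nums c).toNat ≤ t0 := by
          rcases List.mem_cons.1 hjmem with heq | hmem'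
          · omega
          · exact le_of_lt (hsorted.1 _ hmem')
        omega
      rw [pv_getD_set]
      by_cases htc : c = t ∧ t < s.1.length
      · rw [if_pos htc, if_pos (by omega), ← htc.1, ← hpm]
      · rw [if_neg htc, h4 t ht]
        have htc2 : ¬ (c = t) := by
          intro he
          exact htc ⟨he, by omega⟩
        by_cases ht3 : t < c
        · rw [if_pos ht3, if_pos (by omega)]
        · rw [if_neg ht3, if_neg (by omega)]
  · intro t ht
    show ((((pvStk nums c).filter (fun x => decide (pvAv nums c < pvAv nums x))).foldl
      (fun m t => m.set t (c : Int)) s.2.1)).getD t 0 = pvNmU nums (c+1) t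
    rw [pv_foldl_set_getD, h2]
    by_cases hmem : t ∈ (pvStk nums c).filter (fun x => decide (pvAv nums c < pvAv nums x))
    · rw [if_pos ⟨hmem, ht⟩]
      obtain ⟨hs, hb⟩ := List.mem_filter.1 hmem
      obtain ⟨htc, htg⟩ := (pv_mem_stk nums c t).1 hs
      have hlt : pvAv nums c < pvAv nums t := by simpa using hb
      rw [pvNmU_succ nums t c htc, (pv_good_iff_none nums c t htc).1 htg]
      simp [hlt]
    · rw [if_neg (by intro hx; exact hmem hx.1), h5 t ht]
      rcases Nat.lt_or_ge t c with htc | htc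
      · cases hf : pvFindUp nums (pvAv nums t) (t+1) (c-(t+1)) with
        | some j =>
          rw [pvNmU_succ nums t c htc, hf]
          unfold pvNmU
          rw [hf]
        | none =>
          have hgood : pvGood nums c t = true := (pv_good_iff_none nums c t htc).2 hf
          have hstk : t ∈ pvStk nums c := (pv_mem_stk nums c t).2 ⟨htc, hgood⟩
          have hnlt : ¬ (pvAv nums c < pvAv nums t) := by
            intro hlt
            exact hmem (List.mem_filter.2 ⟨hstk, by simpa using hlt⟩)
          rw [pvNmU_succ nums t c htc, hf]
          unfold pvNmU
          rw [hf, if_neg hnlt]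
      · rw [pvNmU_ge nums c t (by omega), pvNmU_ge nums (c+1) t (by omega)]

lemma pvInv_fold (nums : List Int) : ∀ c, c ≤ nums.length →
    pvInv nums c ((List.range c).foldl (pvStackStep nums)
      (List.replicate nums.length (-1), List.replicate nums.length (nums.length : Int), [])) := by
  intro c
  induction c with
  | zero => intro _; simpa using pvInv_init nums
  | succ c ih =>
    intro hc
    rw [List.range_succ, List.foldl_append, List.foldl_cons, List.foldl_nil]
    exact pvInv_step nums c (by omega) _ (ih (by omega))

lemma pv_getD_eq (l : List Int) (k : Nat) (h : k < l.length) : l.getD k 0 = l[k] := by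
  rw [List.getD_eq_getElem?_getD, List.getElem?_eq_getElem h]
  rfl

lemma pv_prevMin_eq (nums : List Int) :
    ((List.range nums.length).foldl (pvStackStep nums)
      (List.replicate nums.length (-1), List.replicate nums.length (nums.length : Int), [])).1
    = (List.range nums.length).map (fun i => pvPm nums i) := by
  obtain ⟨h1, -, -, h4, -⟩ := pvInv_fold nums nums.length (le_refl _)
  apply List.ext_getElem
  · simp [h1]
  · intro t ht1 ht2
    have htn : t < nums.length := by rwa [h1] at ht1
    rw [List.getElem_map, List.getElem_range, ← pv_getD_eq _ _ ht1, h4 t htn, if_pos htn]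

lemma pv_nextMin_eq (nums : List Int) :
    ((List.range nums.length).foldl (pvStackStep nums)
      (List.replicate nums.length (-1), List.replicate nums.length (nums.length : Int), [])).2.1
    = (List.range nums.length).map (fun i => pvNm nums i) := by
  obtain ⟨-, h2, -, -, h5⟩ := pvInv_fold nums nums.length (le_refl _)
  apply List.ext_getElem
  · simp [h2]
  · intro t ht1 ht2
    have htn : t < nums.length := by rwa [h2] at ht1
    rw [List.getElem_map, List.getElem_range, ← pv_getD_eq _ _ ht1, h5 t htn]
    rfl

lemma pv_nums_eq (nums : List Int) :
    nums = (List.range nums.length).map (fun i => pvAv nums i) := by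
  apply List.ext_getElem
  · simp
  · intro t ht1 ht2
    rw [List.getElem_map, List.getElem_range]
    exact (pv_getD_eq nums t ht1).symm

-- ## bounds for pvPm / pvNm
lemma pv_pm_bounds (nums : List Int) (i : Nat) :
    -1 ≤ pvPm nums i ∧ pvPm nums i < (i : Int) :=
  pvPrev_bounds nums (pvAv nums i) i

lemma pv_nm_bounds (nums : List Int) (i : Nat) (hi : i < nums.length) :
    (i : Int) < pvNm nums i ∧ pvNm nums i ≤ (nums.length : Int) := by
  unfold pvNm pvNmU
  cases hf : pvFindUp nums (pvAv nums i) (i+1) (nums.length-(i+1)) with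
  | some j =>
    obtain ⟨hj1, hj2, -, -⟩ := pvFindUp_some nums (pvAv nums i) _ _ _ hf
    dsimp only
    omega
  | none =>
    dsimp only
    omega

lemma pv_nm_found (nums : List Int) (i : Nat) (hlt : pvNm nums i < (nums.length : Int)) :
    pvAv nums ((pvNm nums i).toNat) < pvAv nums i ∧ (i : Int) < pvNm nums i := by
  unfold pvNm pvNmU at hlt ⊢
  cases hf : pvFindUp nums (pvAv nums i) (i+1) (nums.length-(i+1)) with
  | some j =>
    rw [hf] at hlt
    obtain ⟨hj1, hj2, hj3, -⟩ := pvFindUp_some nums (pvAv nums i) _ _ _ hf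
    dsimp only at hlt ⊢
    constructor
    · simpa using hj3
    · omega
  | none =>
    rw [hf] at hlt
    dsimp only at hlt
    exact absurd hlt (lt_irrefl _)

-- for pm i < t < nm i (t < nums.length): nums[i] ≤ nums[t]
lemma pv_span (nums : List Int) (i t : Nat) (ht : t < nums.length)
    (h1 : pvPm nums i < (t : Int)) (h2 : (t : Int) < pvNm nums i) :
    pvAv nums i ≤ pvAv nums t := by
  rcases Nat.lt_trichotomy t i with hti | hti
  · exact le_of_lt (pvPrev_gt nums (pvAv nums i) i t hti h1)
  · rcases hti with rfl | hti
    · exact le_refl _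
    · unfold pvNm pvNmU at h2
      cases hf : pvFindUp nums (pvAv nums i) (i+1) (nums.length-(i+1)) with
      | some j =>
        rw [hf] at h2
        dsimp only at h2
        obtain ⟨hj1, hj2, hj3, hj4⟩ := pvFindUp_some nums (pvAv nums i) _ _ _ hf
        have := hj4 t (by omega) (by exact_mod_cast h2)
        omega
      | none =>
        rw [pvFindUp_none_iff] at hf
        have := hf t (by omega) (by omega)
        omega

def pvMn (nums : List Int) (i : Nat) : Nat → Int
  | 0 => pvAv nums i
  | k+1 => min (pvMn nums i k) (pvAv nums (i+k+1))
def pvSpecv (nums : List Int) (k : Nat) : Int :=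
  ((List.range (nums.length - k)).map (fun i => pvMn nums i k)).foldl max 0

lemma pv_foldl_max_append (l : List Int) (x b : Int) :
    (l ++ [x]).foldl max b = max (l.foldl max b) x := by
  simp [List.foldl_append]
lemma pv_foldl_max_le {M : Int} : ∀ (l : List Int) (b : Int), b ≤ M → (∀ x ∈ l, x ≤ M) →
    l.foldl max b ≤ M := by
  intro l
  induction l with
  | nil => intro b hb _; simpa using hb
  | cons a t ih =>
    intro b hb h
    simp only [List.mem_cons] at h
    exact ih (max b a) (by simp [hb]; exact h _ (Or.inl rfl)) (fun x hx => h x (Or.inr hx))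
lemma pv_le_foldl_max : ∀ (l : List Int) (b : Int), b ≤ l.foldl max b := by
  intro l
  induction l with
  | nil => simp
  | cons a t ih => intro b; exact le_trans (le_max_left b a) (ih (max b a))
lemma pv_mem_le_foldl_max {x : Int} : ∀ (l : List Int) (b : Int), x ∈ l → x ≤ l.foldl max b := by
  intro l
  induction l with
  | nil => simp
  | cons a t ih =>
    intro b hx
    rcases List.mem_cons.1 hx with rfl | hx
    · exact le_trans (le_max_right b x) (pv_le_foldl_max t _)
    · exact ih _ hx

-- size of the maximal window in which nums[i] is minimal
def pvSzN (nums : List Int) (i : Nat) : Nat := (pvNm nums i - pvPm nums i - 1).toNat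

lemma pv_sz_facts (nums : List Int) (i : Nat) (hi : i < nums.length) :
    1 ≤ pvSzN nums i ∧ pvSzN nums i ≤ nums.length ∧
    (pvSzN nums i : Int) = pvNm nums i - pvPm nums i - 1 ∧
    (pvNm nums i - pvPm nums i - 1 - 1).toNat = pvSzN nums i - 1 := by
  obtain ⟨ha, hb⟩ := pv_pm_bounds nums i
  obtain ⟨hc, hd⟩ := pv_nm_bounds nums i hi
  unfold pvSzN
  omega

-- value of the fill loop
def pvRaw (nums : List Int) (c k : Nat) : Int :=
  (((List.range c).filter (fun i => pvSzN nums i - 1 = k)).map (fun i => pvAv nums i)).foldl max 0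

lemma pv_fill (nums : List Int) : ∀ c, c ≤ nums.length →
    (((List.range c).foldl (fun ans i =>
        ans.set (pvNm nums i - pvPm nums i - 1 - 1).toNat
          (max (ans.getD (pvNm nums i - pvPm nums i - 1 - 1).toNat 0) (pvAv nums i)))
      (List.replicate nums.length 0)).length = nums.length)
    ∧ ∀ k, (((List.range c).foldl (fun ans i =>
        ans.set (pvNm nums i - pvPm nums i - 1 - 1).toNat
          (max (ans.getD (pvNm nums i - pvPm nums i - 1 - 1).toNat 0) (pvAv nums i)))
      (List.replicate nums.length 0))).getD k 0 = pvRaw nums c k := by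
  intro c
  induction c with
  | zero =>
    intro _
    refine ⟨by simp, ?_⟩
    intro k
    simp only [List.range_zero, List.foldl_nil]
    rw [List.getD_eq_getElem?_getD, List.getElem?_replicate]
    have : pvRaw nums 0 k = 0 := by simp [pvRaw]
    rw [this]
    split_ifs <;> rfl
  | succ c ih =>
    intro hc
    obtain ⟨ih1, ih2⟩ := ih (by omega)
    rw [List.range_succ, List.foldl_append, List.foldl_cons, List.foldl_nil]
    obtain ⟨hs1, hs2, hs3, hs4⟩ := pv_sz_facts nums c (by omega)
    refine ⟨by rw [List.length_set]; exact ih1, ?_⟩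
    intro k
    rw [pv_getD_set, ih1, ih2, ih2, hs4]
    have hun : pvRaw nums (c+1) k =
        if pvSzN nums c - 1 = k then max (pvRaw nums c k) (pvAv nums c)
        else pvRaw nums c k := by
      unfold pvRaw
      rw [List.range_succ, List.filter_append]
      by_cases hcase : pvSzN nums c - 1 = k
      · rw [if_pos hcase]
        have : [c].filter (fun i => pvSzN nums i - 1 = k) = [c] := by simp [hcase]
        rw [this, List.map_append]
        exact pv_foldl_max_append _ _ _
      · rw [if_neg hcase]
        have : [c].filter (fun i => pvSzN nums i - 1 = k) = [] := by simp [hcase]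
        rw [this, List.append_nil]
    rw [hun]
    by_cases hcase : pvSzN nums c - 1 = k
    · rw [if_pos hcase, if_pos ⟨hcase, by omega⟩, hcase]
    · rw [if_neg hcase, if_neg (by intro hx; exact hcase hx.1)]

-- suffix maxima of the filled table
def pvSuf (nums : List Int) (k : Nat) : Nat → Int
  | 0 => pvRaw nums nums.length k
  | c+1 => max (pvRaw nums nums.length k) (pvSuf nums (k+1) c)

lemma pv_suffix (nums : List Int) : ∀ c, c ≤ nums.length - 1 →
    ∀ (ans : List Int), ans.length = nums.length →
    (∀ k, ans.getD k 0 = pvRaw nums nums.length k) →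
    (((List.range c).foldl (fun a t =>
        a.set (nums.length - 2 - t)
          (max (a.getD (nums.length - 2 - t) 0) (a.getD (nums.length - 2 - t + 1) 0))) ans).length
      = nums.length)
    ∧ ∀ k, k < nums.length →
      (((List.range c).foldl (fun a t =>
        a.set (nums.length - 2 - t)
          (max (a.getD (nums.length - 2 - t) 0) (a.getD (nums.length - 2 - t + 1) 0))) ans)).getD k 0
      = if nums.length - 1 - c ≤ k then pvSuf nums k (nums.length - 1 - k)
        else pvRaw nums nums.length k := by
  intro c
  induction c with
  | zero =>
    intro _ ans hlen hval
    refine ⟨by simpa using hlen, ?_⟩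
    intro k hk
    simp only [List.range_zero, List.foldl_nil]
    rw [hval k]
    by_cases h : nums.length - 1 - 0 ≤ k
    · rw [if_pos h]
      have hke : k = nums.length - 1 := by omega
      have h2 : nums.length - 1 - k = 0 := by omega
      rw [h2]
      rfl
    · rw [if_neg h]
  | succ c ih =>
    intro hc ans hlen hval
    obtain ⟨ih1, ih2⟩ := ih (by omega) ans hlen hval
    rw [List.range_succ, List.foldl_append, List.foldl_cons, List.foldl_nil]
    refine ⟨by rw [List.length_set]; exact ih1, ?_⟩
    intro k hk
    have hi : nums.length - 2 - c = nums.length - 1 - (c+1) := by omega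
    rw [pv_getD_set, ih1]
    by_cases hcase : nums.length - 2 - c = k ∧ k < nums.length
    · rw [if_pos hcase]
      have hk1 : k = nums.length - 2 - c := hcase.1.symm
      have hkne : ¬ (nums.length - 1 - c ≤ k) := by omega
      have hknext : nums.length - 1 - c ≤ k + 1 := by omega
      have hkn1 : k + 1 < nums.length := by omega
      have harith : nums.length - 1 - k = (nums.length - 1 - (k+1)) + 1 := by omega
      rw [hcase.1, ih2 k hk, if_neg hkne, ih2 (k+1) hkn1, if_pos hknext, if_pos (by omega),
        harith]
      rfl
    · rw [if_neg hcase, ih2 k hk]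
      have hne : ¬ (nums.length - 2 - c = k) := by
        intro he
        exact hcase ⟨he, hk⟩
      by_cases h2 : nums.length - 1 - (c+1) ≤ k
      · rw [if_pos h2, if_pos (by omega)]
      · rw [if_neg h2, if_neg (by omega)]

-- ## window-minimum facts
lemma pv_mn_le (nums : List Int) (s : Nat) : ∀ k t, t ≤ k → pvMn nums s k ≤ pvAv nums (s+t) := by
  intro k
  induction k with
  | zero =>
    intro t ht
    have : t = 0 := by omega
    subst this
    exact le_refl _
  | succ k ih =>
    intro t ht
    rcases Nat.lt_or_ge t (k+1) with h | h
    · exact le_trans (min_le_left _ _) (ih t (by omega))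
    · have : t = k+1 := by omega
      subst this
      exact le_trans (min_le_right _ _) (by rw [show s+(k+1) = s+k+1 by omega])

lemma pv_le_mn (nums : List Int) (s : Nat) {x : Int} : ∀ k, (∀ t, t ≤ k → x ≤ pvAv nums (s+t)) →
    x ≤ pvMn nums s k := by
  intro k
  induction k with
  | zero => intro h; simpa using h 0 (le_refl 0)
  | succ k ih =>
    intro h
    refine le_min (ih (fun t ht => h t (by omega))) ?_
    rw [show s+k+1 = s+(k+1) by omega]
    exact h (k+1) (le_refl _)

-- first index in [s, s+k] attaining the window minimum
def pvAm (nums : List Int) (s : Nat) : Nat → Nat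
  | 0 => s
  | k+1 => if pvAv nums (s+k+1) < pvMn nums s k then s+k+1 else pvAm nums s k

lemma pvAm_facts (nums : List Int) (s : Nat) : ∀ k,
    s ≤ pvAm nums s k ∧ pvAm nums s k ≤ s + k ∧
    pvAv nums (pvAm nums s k) = pvMn nums s k ∧
    (∀ t, s ≤ t → t < pvAm nums s k → pvMn nums s k < pvAv nums t) := by
  intro k
  induction k with
  | zero =>
    have h0 : pvAm nums s 0 = s := rfl
    refine ⟨by omega, by omega, rfl, ?_⟩
    intro t ht1 ht2
    omega
  | succ k ih =>
    obtain ⟨ih1, ih2, ih3, ih4⟩ := ih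
    by_cases h : pvAv nums (s+k+1) < pvMn nums s k
    · have ham : pvAm nums s (k+1) = s+k+1 := by simp [pvAm, h]
      have hmn : pvMn nums s (k+1) = pvAv nums (s+k+1) := by
        simp only [pvMn]
        exact min_eq_right (le_of_lt h)
      refine ⟨by omega, by omega, by rw [ham, hmn], ?_⟩
      intro t ht1 ht2
      rw [ham] at ht2
      rw [hmn]
      calc pvAv nums (s+k+1) < pvMn nums s k := h
        _ ≤ pvAv nums (s+(t-s)) := pv_mn_le nums s k (t-s) (by omega)
        _ = pvAv nums t := by rw [show s+(t-s) = t by omega]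
    · have ham : pvAm nums s (k+1) = pvAm nums s k := by simp [pvAm, h]
      have hmn : pvMn nums s (k+1) = pvMn nums s k := by
        simp only [pvMn]
        exact min_eq_left (not_lt.1 h)
      refine ⟨by omega, by omega, by rw [ham, hmn]; exact ih3, ?_⟩
      intro t ht1 ht2
      rw [ham] at ht2
      rw [hmn]
      exact ih4 t ht1 ht2

-- a window of size k+1 on which the minimum equals nums[i], taken inside i's span
lemma pv_key1 (nums : List Int) (i k : Nat) (hi : i < nums.length) (hk : k < nums.length)
    (hsz : k + 1 ≤ pvSzN nums i) :
    ∃ s, s < nums.length - k ∧ pvMn nums s k = pvAv nums i := by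
  obtain ⟨hpa, hpb⟩ := pv_pm_bounds nums i
  obtain ⟨hna, hnb⟩ := pv_nm_bounds nums i hi
  obtain ⟨hs1, hs2, hs3, -⟩ := pv_sz_facts nums i hi
  set sI : Int := min (i : Int) (pvNm nums i - 1 - k) with hsI
  have h0 : 0 ≤ sI := by omega
  have hle : sI ≤ i := by omega
  have hik : (i : Int) ≤ sI + k := by omega
  have hkn : sI + k ≤ pvNm nums i - 1 := by omega
  have hpm : pvPm nums i < sI := by omega
  refine ⟨sI.toNat, by omega, ?_⟩
  have hoff : sI.toNat + (i - sI.toNat) = i := by omega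
  apply le_antisymm
  · have := pv_mn_le nums sI.toNat k (i - sI.toNat) (by omega)
    rwa [hoff] at this
  · apply pv_le_mn
    intro t ht
    apply pv_span nums i (sI.toNat + t) (by omega) (by omega) (by omega)

-- the leftmost minimum of any window has span covering the window
lemma pv_key2 (nums : List Int) (s k : Nat) (hs : s < nums.length - k) :
    pvAm nums s k < nums.length ∧
    pvAv nums (pvAm nums s k) = pvMn nums s k ∧
    k + 1 ≤ pvSzN nums (pvAm nums s k) := by
  obtain ⟨ha1, ha2, ha3, ha4⟩ := pvAm_facts nums s k
  set i := pvAm nums s k with hidef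
  have hin : i < nums.length := by omega
  obtain ⟨hpa, hpb⟩ := pv_pm_bounds nums i
  obtain ⟨hna, hnb⟩ := pv_nm_bounds nums i hin
  refine ⟨hin, ha3, ?_⟩
  have hpm : pvPm nums i < (s : Int) := by
    by_contra hcon
    push Not at hcon
    have h0 : 0 ≤ pvPm nums i := by omega
    obtain ⟨hval, hlt⟩ := pvPrev_val nums (pvAv nums i) i h0
    have hj := ha4 (pvPm nums i).toNat (by omega) (by omega)
    have hval' : pvAv nums (pvPm nums i).toNat ≤ pvAv nums i := hval
    rw [← ha3] at hj
    have : pvAv nums i < pvAv nums i := lt_of_lt_of_le hj hval'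
    exact absurd this (lt_irrefl _)
  have hnm : (s : Int) + k < pvNm nums i := by
    by_contra hcon
    push Not at hcon
    have hfound : pvNm nums i < (nums.length : Int) := by omega
    obtain ⟨hval, hgt⟩ := pv_nm_found nums i hfound
    have hmem := pv_mn_le nums s k ((pvNm nums i).toNat - s) (by omega)
    rw [show s + ((pvNm nums i).toNat - s) = (pvNm nums i).toNat by omega] at hmem
    have := lt_of_le_of_lt hmem hval
    rw [ha3] at this
    exact absurd this (lt_irrefl _)
  obtain ⟨-, -, hs3, -⟩ := pv_sz_facts nums i hin
  omega

-- ## bounds through pvRaw / pvSpecv / pvSuf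
lemma pv_raw_nonneg (nums : List Int) (c k : Nat) : 0 ≤ pvRaw nums c k :=
  pv_le_foldl_max _ 0

lemma pv_le_raw (nums : List Int) (i c k : Nat) (hi : i < c) (hsz : pvSzN nums i - 1 = k) :
    pvAv nums i ≤ pvRaw nums c k := by
  apply pv_mem_le_foldl_max
  exact List.mem_map_of_mem (List.mem_filter.2 ⟨List.mem_range.2 hi, by simp [hsz]⟩)

lemma pv_raw_le (nums : List Int) (c k : Nat) {M : Int} (h0 : 0 ≤ M)
    (h : ∀ i, i < c → pvSzN nums i - 1 = k → pvAv nums i ≤ M) :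
    pvRaw nums c k ≤ M := by
  apply pv_foldl_max_le _ _ h0
  intro x hx
  obtain ⟨i, hmem, rfl⟩ := List.mem_map.1 hx
  obtain ⟨hir, hif⟩ := List.mem_filter.1 hmem
  exact h i (List.mem_range.1 hir) (by simpa using hif)

lemma pv_spec_nonneg (nums : List Int) (k : Nat) : 0 ≤ pvSpecv nums k :=
  pv_le_foldl_max _ 0

lemma pv_le_spec (nums : List Int) (s k : Nat) (hs : s < nums.length - k) :
    pvMn nums s k ≤ pvSpecv nums k := by
  apply pv_mem_le_foldl_max
  exact List.mem_map_of_mem (List.mem_range.2 hs)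

lemma pv_spec_le (nums : List Int) (k : Nat) {M : Int} (h0 : 0 ≤ M)
    (h : ∀ s, s < nums.length - k → pvMn nums s k ≤ M) :
    pvSpecv nums k ≤ M := by
  apply pv_foldl_max_le _ _ h0
  intro x hx
  obtain ⟨s, hmem, rfl⟩ := List.mem_map.1 hx
  exact h s (List.mem_range.1 hmem)

lemma pv_le_suf (nums : List Int) : ∀ cnt k t, k ≤ t → t ≤ k + cnt →
    pvRaw nums nums.length t ≤ pvSuf nums k cnt := by
  intro cnt
  induction cnt with
  | zero =>
    intro k t h1 h2
    have : t = k := by omega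
    subst this
    exact le_refl _
  | succ cnt ih =>
    intro k t h1 h2
    rcases Nat.eq_or_lt_of_le h1 with rfl | h
    · exact le_max_left _ _
    · exact le_trans (ih (k+1) t (by omega) (by omega)) (le_max_right _ _)

lemma pv_suf_le (nums : List Int) : ∀ cnt k {M : Int},
    (∀ t, k ≤ t → t ≤ k + cnt → pvRaw nums nums.length t ≤ M) → pvSuf nums k cnt ≤ M := by
  intro cnt
  induction cnt with
  | zero => intro k M h; exact h k (le_refl _) (by omega)
  | succ cnt ih =>
    intro k M h
    apply max_le (h k (le_refl _) (by omega))
    exact ih (k+1) (fun t h1 h2 => h t (by omega) (by omega))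

-- the value after the suffix pass equals the per-size optimum
lemma pv_final (nums : List Int) (k : Nat) (hk : k < nums.length) :
    pvSuf nums k (nums.length - 1 - k) = pvSpecv nums k := by
  apply le_antisymm
  · apply pv_suf_le
    intro t ht1 ht2
    apply pv_raw_le nums nums.length t (pv_spec_nonneg nums k)
    intro i hi hsz
    obtain ⟨hs1, hs2, -, -⟩ := pv_sz_facts nums i hi
    obtain ⟨s, hs, hmn⟩ := pv_key1 nums i k hi hk (by omega)
    rw [← hmn]
    exact pv_le_spec nums s k hs
  · apply pv_spec_le nums k
    · exact le_trans (pv_raw_nonneg nums nums.length k)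
        (pv_le_suf nums (nums.length - 1 - k) k k (le_refl _) (by omega))
    · intro s hs
      obtain ⟨hin, hval, hsz⟩ := pv_key2 nums s k hs
      obtain ⟨hs1, hs2, -, -⟩ := pv_sz_facts nums (pvAm nums s k) hin
      rw [← hval]
      calc pvAv nums (pvAm nums s k)
          ≤ pvRaw nums nums.length (pvSzN nums (pvAm nums s k) - 1) :=
            pv_le_raw nums _ _ _ hin rfl
        _ ≤ pvSuf nums k (nums.length - 1 - k) :=
            pv_le_suf nums _ k _ (by omega) (by omega)

def pvPS (nums : List Int) (c k : Nat) : Int :=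
  ((List.range (min c (nums.length - k))).map (fun i => pvMn nums i k)).foldl max 0


lemma pvB_inner (nums : List Int) (i : Nat) (hi : i < nums.length) :
    ∀ (c : Nat), c ≤ nums.length - i → ∀ (ans : List Int), ans.length = nums.length →
    ((List.range' i c).foldl (fun (st : Int × List Int) j =>
        let m := min st.1 (nums.getD j 0)
        (m, st.2.set (j - i) (max (st.2.getD (j - i) 0) m)))
      (nums.getD i 0, ans)).1 = pvMn nums i (c-1)
    ∧ ((List.range' i c).foldl (fun (st : Int × List Int) j =>
        let m := min st.1 (nums.getD j 0)
        (m, st.2.set (j - i) (max (st.2.getD (j - i) 0) m)))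
      (nums.getD i 0, ans)).2.length = nums.length
    ∧ ∀ t, ((List.range' i c).foldl (fun (st : Int × List Int) j =>
        let m := min st.1 (nums.getD j 0)
        (m, st.2.set (j - i) (max (st.2.getD (j - i) 0) m)))
      (nums.getD i 0, ans)).2.getD t 0
        = if t < c then max (ans.getD t 0) (pvMn nums i t) else ans.getD t 0 := by
  intro c
  induction c with
  | zero => intro _ ans hlen; simp [pvMn, pvAv, hlen]
  | succ c ih =>
    intro hc ans hlen
    have hc' : c ≤ nums.length - i := Nat.le_of_succ_le hc
    obtain ⟨ih1, ih2, ih3⟩ := ih hc' ans hlen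
    have hcn : c < nums.length := by omega
    rw [List.range'_1_concat, List.foldl_append]
    simp only [List.foldl_cons, List.foldl_nil]
    set P := (List.range' i c).foldl (fun (st : Int × List Int) j =>
        let m := min st.1 (nums.getD j 0)
        (m, st.2.set (j - i) (max (st.2.getD (j - i) 0) m)))
      (nums.getD i 0, ans) with hP
    have hidx : i + c - i = c := by omega
    have hm : min P.1 (nums.getD (i + c) 0) = pvMn nums i c := by
      rw [ih1]
      cases c with
      | zero => simp [pvMn, pvAv]
      | succ c' => simp [pvMn, pvAv, Nat.add_assoc]
    refine ⟨?_, ?_, ?_⟩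
    · simpa using hm
    · simp only [hidx, List.length_set]
      exact ih2
    · intro t
      simp only [hidx]
      rw [pv_getD_set _ _ _ _, ih2]
      by_cases ht : t = c
      · subst ht
        rw [if_pos ⟨rfl, hcn⟩, ih3 t, if_neg (by omega), hm, if_pos (by omega)]
      · rw [if_neg (by intro h; exact ht h.1.symm), ih3 t]
        by_cases ht2 : t < c
        · rw [if_pos ht2, if_pos (by omega)]
        · rw [if_neg ht2, if_neg (by omega)]

lemma pvPS_succ (nums : List Int) (i k : Nat) (hi : i < nums.length) :
    pvPS nums (i+1) k = if k < nums.length - i then max (pvPS nums i k) (pvMn nums i k)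
      else pvPS nums i k := by
  unfold pvPS
  by_cases h : k < nums.length - i
  · have h1 : min (i+1) (nums.length - k) = (min i (nums.length - k)) + 1 := by omega
    have h2 : min i (nums.length - k) = i := by omega
    rw [if_pos h, h1, h2, List.range_succ]
    simp [List.foldl_append]
  · have h1 : min (i+1) (nums.length - k) = min i (nums.length - k) := by omega
    rw [if_neg h, h1]

lemma pvB_outer (nums : List Int) :
    ∀ (c : Nat), c ≤ nums.length →
    ((List.range c).foldl (fun ans i =>
      ((List.range' i (nums.length - i)).foldl (fun (st : Int × List Int) j =>
          let m := min st.1 (nums.getD j 0)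
          (m, st.2.set (j - i) (max (st.2.getD (j - i) 0) m)))
        (nums.getD i 0, ans)).2) (List.replicate nums.length 0)).length = nums.length
    ∧ ∀ k, ((List.range c).foldl (fun ans i =>
      ((List.range' i (nums.length - i)).foldl (fun (st : Int × List Int) j =>
          let m := min st.1 (nums.getD j 0)
          (m, st.2.set (j - i) (max (st.2.getD (j - i) 0) m)))
        (nums.getD i 0, ans)).2) (List.replicate nums.length 0)).getD k 0 = pvPS nums c k := by
  intro c
  induction c with
  | zero =>
    intro _
    refine ⟨by simp, ?_⟩
    intro k
    have h0 : pvPS nums 0 k = 0 := by simp [pvPS]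
    rw [h0]
    simp only [List.range_zero, List.foldl_nil, List.getD_eq_getElem?_getD,
      List.getElem?_replicate]
    split_ifs <;> rfl

  | succ c ih =>
    intro hc
    obtain ⟨ih1, ih2⟩ := ih (by omega)
    rw [List.range_succ, List.foldl_append]
    simp only [List.foldl_cons, List.foldl_nil]
    have hcl : c < nums.length := by omega
    obtain ⟨-, hlen, hget⟩ := pvB_inner nums c hcl (nums.length - c) (le_refl _) _ ih1
    refine ⟨hlen, ?_⟩
    intro k
    rw [hget k, pvPS_succ nums c k hcl, ih2 k]

theorem pvB_char (nums : List Int) :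
    findMaximums_alt nums = (List.range nums.length).map (pvSpecv nums) := by
  obtain ⟨h1, h2⟩ := pvB_outer nums nums.length (le_refl _)
  show ((List.range nums.length).foldl _ (List.replicate nums.length 0)) = _
  apply List.ext_getElem
  · rw [h1]; simp
  · intro k hk hk2
    have hkn : k < nums.length := by simpa using hk2
    rw [List.getElem_map, List.getElem_range, ← pv_getD_eq _ _ hk, h2 k]
    have hmin : min nums.length (nums.length - k) = nums.length - k := by omega
    simp [pvPS, pvSpecv]

-- ## assembling the characterisation of port A
lemma pv_zip_eq (nums : List Int) :
    nums.zip (((List.range nums.length).map (fun i => pvPm nums i)).zip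
      ((List.range nums.length).map (fun i => pvNm nums i)))
    = (List.range nums.length).map (fun i => (pvAv nums i, pvPm nums i, pvNm nums i)) := by
  rw [List.zip_map']
  rw [show nums.zip ((List.range nums.length).map (fun a => (pvPm nums a, pvNm nums a)))
      = ((List.range nums.length).map (fun i => pvAv nums i)).zip
        ((List.range nums.length).map (fun a => (pvPm nums a, pvNm nums a)))
    from by rw [← pv_nums_eq nums]]
  rw [List.zip_map']

lemma pv_foldl_congr_range {α : Type} : ∀ (c : Nat) (init : α) (f g : α → Nat → α),
    (∀ b k, k < c → f b k = g b k) →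
    (List.range c).foldl f init = (List.range c).foldl g init := by
  intro c
  induction c with
  | zero => intro init f g h; rfl
  | succ c ih =>
    intro init f g h
    rw [List.range_succ, List.foldl_append, List.foldl_append, List.foldl_cons, List.foldl_cons,
      List.foldl_nil, List.foldl_nil, ih init f g (fun b k hk => h b k (by omega)),
      h _ c (by omega)]

lemma pv_pyRange_countdown (n : Nat) :
    PySem.List.pyRange ((n : Int) - 2) (-1) (-1)
      = (List.range (n-1)).map (fun k => ((n : Int) - 2 - (k : Nat))) := by
  rw [PySem.List.pyRange_neg_one, show ((n : Int) - 2 - (-1)).toNat = n - 1 by omega]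

theorem pvA_char (nums : List Int) :
    findMaximums nums = (List.range nums.length).map (pvSpecv nums) := by
  obtain ⟨hf1, hf2⟩ := pv_fill nums nums.length (le_refl _)
  obtain ⟨hs1, hs2⟩ := pv_suffix nums (nums.length - 1) (le_refl _) _ hf1 hf2
  have hcong := pv_foldl_congr_range (nums.length - 1)
    ((List.range nums.length).foldl (fun ans i =>
        ans.set (pvNm nums i - pvPm nums i - 1 - 1).toNat
          (max (ans.getD (pvNm nums i - pvPm nums i - 1 - 1).toNat 0) (pvAv nums i)))
      (List.replicate nums.length 0))
    (fun (a : List Int) (k : Nat) =>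
      (fun (ans : List Int) (i : Int) =>
        ans.set i.toNat (max (ans.getD i.toNat 0) (ans.getD (i.toNat + 1) 0))) a
        ((nums.length : Int) - 2 - (k : Nat)))
    (fun (a : List Int) (t : Nat) =>
      a.set (nums.length - 2 - t)
        (max (a.getD (nums.length - 2 - t) 0) (a.getD (nums.length - 2 - t + 1) 0)))
    (fun b k hk => by
      have h1 : ((nums.length : Int) - 2 - (k : Nat)).toNat = nums.length - 2 - k := by omega
      simp only [h1])
  have key : (List.range (nums.length - 1)).foldl
      (fun (a : List Int) (k : Nat) =>
        (fun (ans : List Int) (i : Int) =>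
          ans.set i.toNat (max (ans.getD i.toNat 0) (ans.getD (i.toNat + 1) 0))) a
          ((nums.length : Int) - 2 - (k : Nat)))
      ((List.range nums.length).foldl (fun ans i =>
          ans.set (pvNm nums i - pvPm nums i - 1 - 1).toNat
            (max (ans.getD (pvNm nums i - pvPm nums i - 1 - 1).toNat 0) (pvAv nums i)))
        (List.replicate nums.length 0))
      = (List.range nums.length).map (pvSpecv nums) := by
    rw [hcong]
    apply List.ext_getElem
    · rw [hs1]; simp
    · intro k hk1 hk2
      have hkn : k < nums.length := by rwa [hs1] at hk1
      rw [List.getElem_map, List.getElem_range, ← pv_getD_eq _ _ hk1, hs2 k hkn,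
        if_pos (by omega), pv_final nums k hkn]
  simp only [findMaximums]
  rw [pv_prevMin_eq, pv_nextMin_eq, pv_zip_eq, List.foldl_map, pv_pyRange_countdown,
    List.foldl_map]
  exact key

-- ===== VERDICT (by name: the statement is the Claim_ definition above) =====
theorem findMaximums_spec : Claim_equal_findMaximums := by
  intro nums _
  unfold Spec_findMaximums
  rw [pvA_char, pvB_char]
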